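-- pv_equiv track=rewrite | github.com/rithvikananth/Fire-maze | K_trial.py | mazepath
-- ===== SOURCE A (Python) =====
-- def mazepath(maze_path, path):
--     w = len(maze_path)
--     for row in range(w):
--         for column in range(w):
--             if (row, column) in path:
--                 maze_path[row][column] = 0
--             else:
--                 maze_path[row][column] = 1
--     return maze_path
-- ===== SOURCE B (Python) =====
-- def mazepath(maze_path, path):
--     w = len(maze_path)
--     for row in maze_path:
--         row[:w] = [1] * w
--     for r, c in path:
--         if 0 <= r < w and 0 <= c < w:
--             maze_path[r][c] = 0
--     return maze_path
-- ===== Notes on version B (the rewrite author's own statement) =====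
-- stated objective: faster
-- what changed: Instead of scanning every cell and testing (row,col) membership in path, B fills the whole grid with 1s and then marks only the in-range coordinates of path with 0, removing the per-cell list scan.
import Mathlib
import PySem

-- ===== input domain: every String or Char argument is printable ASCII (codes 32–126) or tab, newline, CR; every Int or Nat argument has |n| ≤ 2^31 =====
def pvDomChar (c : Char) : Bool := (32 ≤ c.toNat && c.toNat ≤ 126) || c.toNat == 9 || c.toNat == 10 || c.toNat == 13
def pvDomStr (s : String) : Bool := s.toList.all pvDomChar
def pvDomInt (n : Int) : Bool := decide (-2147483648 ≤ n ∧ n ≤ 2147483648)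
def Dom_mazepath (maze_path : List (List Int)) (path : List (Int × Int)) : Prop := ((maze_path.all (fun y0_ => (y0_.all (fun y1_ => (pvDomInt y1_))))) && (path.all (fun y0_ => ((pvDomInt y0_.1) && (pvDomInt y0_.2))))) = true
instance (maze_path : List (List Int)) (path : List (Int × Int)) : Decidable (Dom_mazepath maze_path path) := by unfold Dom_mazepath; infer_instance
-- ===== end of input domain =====

-- B fills the grid with 1s and then marks only the in-range coordinates of path with 0,
-- replacing A's per-cell membership scan of path; both Pythons mutate maze_path in place
-- identically on Pre_, and the equivalence proved here is about the return value.

-- ===== PORT A =====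
-- nested loops: for row in range(w): for column in range(w): set the cell to 0 or 1
def mazepath (maze_path : List (List Int)) (path : List (Int × Int)) : List (List Int) :=
  let w := maze_path.length
  (List.range w).foldl (fun acc row =>
    acc.set row ((List.range w).foldl (fun rowAcc column =>
        rowAcc.set column (if (Int.ofNat row, Int.ofNat column) ∈ path then 0 else 1))
      (acc.getD row []))) maze_path

-- ===== PORT B =====
-- row[:w] = [1]*w  is exactly  replicate w 1 ++ row.drop w  (Python slice-assignment)
def mazepath_alt (maze_path : List (List Int)) (path : List (Int × Int)) : List (List Int) :=
  let w := maze_path.length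
  let filled := maze_path.map (fun row => List.replicate w (1 : Int) ++ row.drop w)
  path.foldl (fun g p =>
    if 0 ≤ p.1 ∧ p.1 < (w : Int) ∧ 0 ≤ p.2 ∧ p.2 < (w : Int) then
      g.set p.1.toNat ((g.getD p.1.toNat []).set p.2.toNat 0)
    else g) filled

-- ===== PRECONDITION & SPEC =====
-- Pre_ excludes inputs where some row is shorter than the number of rows: there A's
-- assignment maze_path[row][column] raises IndexError (it returns no value).
def Pre_mazepath (maze_path : List (List Int)) (path : List (Int × Int)) : Prop :=
  ∀ row ∈ maze_path, maze_path.length ≤ row.length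
instance (maze_path : List (List Int)) (path : List (Int × Int)) : Decidable (Pre_mazepath maze_path path) := by unfold Pre_mazepath; infer_instance

def pvWitness_mazepath : List (List Int) × (List (Int × Int)) :=
  ([[5, 5], [5, 5]], [(0, 1), (1, 1)])

def Spec_mazepath (maze_path : List (List Int)) (path : List (Int × Int)) (out : List (List Int)) : Prop := out = mazepath_alt maze_path path
instance (maze_path : List (List Int)) (path : List (Int × Int)) (out : List (List Int)) : Decidable (Spec_mazepath maze_path path out) := by unfold Spec_mazepath; infer_instance

-- ===== CLAIM (what is proved, stated in full; the proofs are below) =====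
def Claim_equal_mazepath : Prop := ∀ (maze_path : List (List Int)) (path : List (Int × Int)), Dom_mazepath maze_path path → Pre_mazepath maze_path path → Spec_mazepath maze_path path (mazepath maze_path path)

-- ===== LEMMAS AND PROOFS =====

-- the canonical value both ports compute
def pvCanon (maze_path : List (List Int)) (path : List (Int × Int)) : List (List Int) :=
  let w := maze_path.length
  (List.range w).map (fun r =>
    (List.range w).map (fun c => if (Int.ofNat r, Int.ofNat c) ∈ path then 0 else 1)
      ++ (maze_path.getD r []).drop w)

-- a left fold of in-range set-updates over range k rewrites the first k entries
lemma foldl_set_range {α : Type} (d : α) (g : Nat → α → α) :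
    ∀ (k : Nat) (m : List α), k ≤ m.length →
      (List.range k).foldl (fun acc r => acc.set r (g r (acc.getD r d))) m
        = (List.range k).map (fun r => g r (m.getD r d)) ++ m.drop k := by
  intro k
  induction k with
  | zero => intro m _; simp
  | succ k ih =>
    intro m hk
    have hkm : k < m.length := by omega
    rw [List.range_succ, List.foldl_append, List.map_append, List.foldl_cons, List.foldl_nil,
      ih m (Nat.le_of_lt hkm)]
    have hlen : ((List.range k).map (fun r => g r (m.getD r d))).length = k := by simp
    have hgetD : ((List.range k).map (fun r => g r (m.getD r d)) ++ m.drop k).getD k d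
        = m.getD k d := by
      simp [List.getD, List.getElem?_append_right, List.getElem?_drop]
    rw [hgetD, List.set_append_right _ _ (by omega), hlen, Nat.sub_self,
      List.drop_eq_getElem_cons hkm, List.set_cons_zero]
    simp only [List.map_cons, List.map_nil, List.append_assoc, List.singleton_append]

-- recovering a list from its first w entries and its tail
lemma row_recover (d : Int) : ∀ (w : Nat) (l : List Int), w ≤ l.length →
    (List.range w).map (fun c => l.getD c d) ++ l.drop w = l := by
  intro w
  induction w with
  | zero => intro l _; simp
  | succ w ih =>
    intro l hl
    have hw : w < l.length := by omega
    rw [List.range_succ, List.map_append]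
    simp only [List.map_cons, List.map_nil]
    rw [List.append_assoc, List.singleton_append, List.getD_eq_getElem _ _ hw,
      ← List.drop_eq_getElem_cons hw]
    exact ih l (Nat.le_of_lt hw)

-- A's port equals the canonical grid on Pre_
lemma mazepath_canon (maze_path : List (List Int)) (path : List (Int × Int))
    (hpre : Pre_mazepath maze_path path) :
    mazepath maze_path path = pvCanon maze_path path := by
  unfold mazepath pvCanon
  set w := maze_path.length with hw
  rw [foldl_set_range ([] : List Int)
    (fun row x => (List.range w).foldl (fun rowAcc column =>
      rowAcc.set column (if (Int.ofNat row, Int.ofNat column) ∈ path then 0 else 1)) x)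
    w maze_path (le_refl _)]
  rw [hw, List.drop_length, List.append_nil]
  apply List.map_congr_left
  intro r hr
  rw [List.mem_range] at hr
  have hrow : w ≤ (maze_path.getD r []).length := by
    have := hpre (maze_path.getD r []) (by
      rw [List.getD_eq_getElem _ _ (by omega)]
      exact List.getElem_mem _)
    omega
  exact foldl_set_range 0 (fun c _ => if (Int.ofNat r, Int.ofNat c) ∈ path then 0 else 1)
    w (maze_path.getD r []) hrow

-- the marking fold of B, as a named function for the lemmas
def pvMark (w : Nat) (path : List (Int × Int)) (g : List (List Int)) : List (List Int) :=
  path.foldl (fun g p =>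
    if 0 ≤ p.1 ∧ p.1 < (w : Int) ∧ 0 ≤ p.2 ∧ p.2 < (w : Int) then
      g.set p.1.toNat ((g.getD p.1.toNat []).set p.2.toNat 0)
    else g) g

-- B's marking fold, characterised pointwise
lemma mark_char (w : Nat) : ∀ (path : List (Int × Int)) (g : List (List Int)),
    g.length = w → (∀ r, r < w → w ≤ (g.getD r []).length) →
    pvMark w path g = (List.range w).map (fun r =>
      (List.range w).map (fun c =>
        if (Int.ofNat r, Int.ofNat c) ∈ path then 0 else (g.getD r []).getD c 0)
      ++ (g.getD r []).drop w) := by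
  intro path
  induction path with
  | nil =>
    intro g hlen hrow
    simp only [pvMark, List.foldl_nil, List.not_mem_nil, if_false]
    apply List.ext_getElem (by simp [hlen])
    intro r h1 h2
    have hr : r < w := by simpa using h2
    have hrg : r < g.length := by omega
    simp only [List.getElem_map, List.getElem_range]
    rw [row_recover 0 w (g.getD r []) (hrow r hr), List.getD_eq_getElem _ _ hrg]
  | cons p rest ih =>
    intro g hlen hrow
    by_cases hguard : 0 ≤ p.1 ∧ p.1 < (w : Int) ∧ 0 ≤ p.2 ∧ p.2 < (w : Int)
    · -- the head of path marks cell (p.1.toNat, p.2.toNat)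
      obtain ⟨h1, h2, h3, h4⟩ := hguard
      set a := p.1.toNat with hadef
      set b := p.2.toNat with hbdef
      have hpa : p.1 = Int.ofNat a := by simp [hadef, Int.toNat_of_nonneg h1]
      have hpb : p.2 = Int.ofNat b := by simp [hbdef, Int.toNat_of_nonneg h3]
      have ha : a < w := by omega
      have hb : b < w := by omega
      have hag : a < g.length := by omega
      set g' := g.set a ((g.getD a []).set b 0) with hg'def
      have hstep : pvMark w (p :: rest) g = pvMark w rest g' := by
        simp only [pvMark, List.foldl_cons]
        rw [if_pos ⟨h1, h2, h3, h4⟩]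
      have hget' : ∀ r, g'.getD r [] =
          if r = a then (g.getD a []).set b 0 else g.getD r [] := by
        intro r
        by_cases h : r = a
        · subst h; simp [hg'def, List.getD, hag]
        · simp [hg'def, List.getD, List.getElem?_set_ne (fun hh => h hh.symm), h]
      have hlen' : g'.length = w := by simp [hg'def, hlen]
      have hrow' : ∀ r, r < w → w ≤ (g'.getD r []).length := by
        intro r hr
        rw [hget' r]
        by_cases h : r = a
        · rw [if_pos h]; simpa using hrow a ha
        · rw [if_neg h]; exact hrow r hr
      rw [hstep, ih g' hlen' hrow']
      apply List.map_congr_left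
      intro r hrmem
      rw [List.mem_range] at hrmem
      have hdropEq : (g'.getD r []).drop w = (g.getD r []).drop w := by
        rw [hget' r]
        by_cases h : r = a <;> simp [h, List.drop_set, hb]
      rw [hdropEq]
      congr 1
      apply List.map_congr_left
      intro c hcmem
      rw [List.mem_range] at hcmem
      by_cases hm : (Int.ofNat r, Int.ofNat c) ∈ rest
      · rw [if_pos hm, if_pos (List.mem_cons.mpr (Or.inr hm))]
      · by_cases hpc : p = (Int.ofNat r, Int.ofNat c)
        · have har : a = r := by
            have := congrArg Prod.fst hpc; simp [hpa] at this; omega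
          have hbc : b = c := by
            have := congrArg Prod.snd hpc; simp [hpb] at this; omega
          have hmem : (Int.ofNat r, Int.ofNat c) ∈ p :: rest := by
            rw [hpc]; exact List.mem_cons_self
          rw [if_pos hmem, if_neg hm, hget' r, if_pos har.symm, har, hbc]
          have hcl : c < (g.getD r []).length := by
            have := hrow r hrmem; omega
          simp only [List.getD, List.getElem?_set_self']
          cases (g[r]?.getD ([] : List Int))[c]? <;> rfl
        · have hnmem : (Int.ofNat r, Int.ofNat c) ∉ p :: rest := by
            intro hmem
            rcases List.mem_cons.mp hmem with h | h
            · exact hpc h.symm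
            · exact hm h
          rw [if_neg hnmem, if_neg hm, hget' r]
          by_cases h : r = a
          · subst h
            have hbc : b ≠ c := by
              intro hbc
              exact hpc (by rw [Prod.ext_iff]; exact ⟨by rw [hpa], by rw [hpb, hbc]⟩)
            simp [List.getD, List.getElem?_set_ne hbc]
          · simp [h]
    · -- head out of range: no cell changes, and no in-range cell can equal p
      have hstep : pvMark w (p :: rest) g = pvMark w rest g := by
        simp [pvMark, hguard]
      rw [hstep, ih g hlen hrow]
      apply List.map_congr_left
      intro r hrmem
      rw [List.mem_range] at hrmem
      congr 1
      apply List.map_congr_left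
      intro c hcmem
      rw [List.mem_range] at hcmem
      by_cases hm : (Int.ofNat r, Int.ofNat c) ∈ rest
      · rw [if_pos hm, if_pos (List.mem_cons.mpr (Or.inr hm))]
      · have hnmem : (Int.ofNat r, Int.ofNat c) ∉ p :: rest := by
          intro hmem
          rcases List.mem_cons.mp hmem with h | h
          · apply hguard
            rw [← h]
            refine ⟨by exact Int.natCast_nonneg r, ?_, by exact Int.natCast_nonneg c, ?_⟩
            · show Int.ofNat r < (w : Int)
              rw [Int.ofNat_eq_natCast]; exact_mod_cast hrmem
            · show Int.ofNat c < (w : Int)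
              rw [Int.ofNat_eq_natCast]; exact_mod_cast hcmem
          · exact hm h
        rw [if_neg hnmem, if_neg hm]

-- B's port equals the canonical grid (no Pre_ needed)
lemma mazepath_alt_canon (maze_path : List (List Int)) (path : List (Int × Int)) :
    mazepath_alt maze_path path = pvCanon maze_path path := by
  unfold mazepath_alt pvCanon
  set w := maze_path.length with hw
  set filled := maze_path.map (fun row => List.replicate w (1 : Int) ++ row.drop w)
    with hfilled
  have hflen : filled.length = w := by simp [hfilled, hw]
  have hfget : ∀ r, r < w → filled.getD r []
      = List.replicate w (1 : Int) ++ (maze_path.getD r []).drop w := by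
    intro r hr
    have hr' : r < maze_path.length := by omega
    rw [List.getD_eq_getElem _ _ (by omega), List.getD_eq_getElem _ _ hr']
    simp [hfilled]
  have hfrow : ∀ r, r < w → w ≤ (filled.getD r []).length := by
    intro r hr; rw [hfget r hr]; simp
  have : (path.foldl (fun g p =>
      if 0 ≤ p.1 ∧ p.1 < (w : Int) ∧ 0 ≤ p.2 ∧ p.2 < (w : Int) then
        g.set p.1.toNat ((g.getD p.1.toNat []).set p.2.toNat 0)
      else g) filled) = pvMark w path filled := rfl
  rw [this, mark_char w path filled hflen hfrow]
  apply List.map_congr_left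
  intro r hrmem
  rw [List.mem_range] at hrmem
  rw [hfget r hrmem]
  congr 1
  · apply List.map_congr_left
    intro c hcmem
    rw [List.mem_range] at hcmem
    by_cases hm : (Int.ofNat r, Int.ofNat c) ∈ path
    · rw [if_pos hm, if_pos hm]
    · rw [if_neg hm, if_neg hm]
      rw [List.getD_eq_getElem _ _ (by simp; omega)]
      simp [List.getElem_append_left, hcmem]
  · exact List.drop_left' (by simp)

-- ===== VERDICT (by name: the statement is the Claim_ definition above) =====
theorem mazepath_spec : Claim_equal_mazepath := by
  intro maze_path path _ hpre
  unfold Spec_mazepath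
  rw [mazepath_canon maze_path path hpre, mazepath_alt_canon maze_path path]
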